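-- pv_equiv track=rewrite | github.com/PoroGramr/Algorithm | 프로그래머스/3/12938. 최고의 집합/최고의 집합.py | solution
-- ===== SOURCE A (Python) =====
-- def solution(n, s):
--
--     quo = s // n
--     if quo == 0:
--         return [-1]
--     rem = s % n
--     answer = [quo] * n
--     i = 0
--     while 0 < rem:
--         if i >= n:
--             i %= n
--         answer[i] += 1
--         rem -= 1
--         i += 1
--     answer.sort()
--     return answer
-- ===== SOURCE B (Python) =====
-- def solution(n, s):
--     quo, rem = divmod(s, n)
--     if quo == 0:
--         return [-1]
--     return [quo] * (n - rem) + [quo + 1] * rem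
-- ===== Notes on version B (the rewrite author's own statement) =====
-- stated objective: simpler
-- what changed: B replaces A's unit-by-unit distribution loop plus final sort with a closed form: divmod gives quotient and remainder, and the answer is (n-rem) copies of quo followed by rem copies of quo+1, already in ascending order, so no loop and no sort.
import Mathlib
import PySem

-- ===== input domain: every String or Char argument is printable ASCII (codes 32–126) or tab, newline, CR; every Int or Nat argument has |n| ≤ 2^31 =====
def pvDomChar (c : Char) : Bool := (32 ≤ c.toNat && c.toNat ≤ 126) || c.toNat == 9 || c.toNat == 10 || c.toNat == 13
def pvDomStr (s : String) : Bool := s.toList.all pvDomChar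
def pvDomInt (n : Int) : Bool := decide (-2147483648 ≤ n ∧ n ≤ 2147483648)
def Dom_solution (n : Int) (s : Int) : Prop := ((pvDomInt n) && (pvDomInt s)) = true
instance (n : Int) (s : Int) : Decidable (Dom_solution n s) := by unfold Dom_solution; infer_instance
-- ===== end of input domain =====

-- B computes the answer in closed form ((n-rem) copies of quo, then rem copies of quo+1)
-- instead of A's unit-distribution loop followed by a sort: simpler, no loop, no sort.


-- ===== PORT A =====
-- the while loop: distribute `rem` units one at a time at index i (answer[i] += 1).
-- Inside Pre_ the index is always in range, so the in-place update is exact.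
def solWhile (n : Int) (answer : List Int) (rem : Int) (i : Int) : List Int :=
  if _h : 0 < rem then
    let i' := if i ≥ n then PySem.Int.mod i n else i
    let answer' := answer.set i'.toNat (answer.getD i'.toNat 0 + 1)
    solWhile n answer' (rem - 1) (i' + 1)
  else answer
termination_by rem.toNat
decreasing_by omega

def solution (n : Int) (s : Int) : List Int :=
  let quo := PySem.Int.floordiv s n
  if quo = 0 then [-1]
  else
    let rem := PySem.Int.mod s n
    let answer := PySem.List.pyRepeat [quo] n
    PySem.List.sorted (solWhile n answer rem 0) (fun x => x) false

-- ===== PORT B =====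
def solution_alt (n : Int) (s : Int) : List Int :=
  let quo := PySem.Int.floordiv s n
  let rem := PySem.Int.mod s n
  if quo = 0 then [-1]
  else List.replicate (n - rem).toNat quo ++ List.replicate rem.toNat (quo + 1)

-- ===== PRECONDITION & SPEC =====
-- Python A raises ZeroDivisionError at n = 0 (s // n); that is the only excluded input.
def Pre_solution (n : Int) (s : Int) : Prop := n ≠ 0
instance (n : Int) (s : Int) : Decidable (Pre_solution n s) := by unfold Pre_solution; infer_instance
def pvWitness_solution : Int × Int := (3, 11)

def Spec_solution (n : Int) (s : Int) (out : List Int) : Prop := out = solution_alt n s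
instance (n : Int) (s : Int) (out : List Int) : Decidable (Spec_solution n s out) := by unfold Spec_solution; infer_instance

-- ===== CLAIM (what is proved, stated in full; the proofs are below) =====
def Claim_equal_solution : Prop := ∀ (n : Int) (s : Int), Dom_solution n s → Pre_solution n s → Spec_solution n s (solution n s)

-- ===== LEMMAS AND PROOFS =====

lemma getD_rep (j m : Nat) (hm : 0 < m) (a b : Int) :
    (List.replicate j b ++ List.replicate m a).getD j 0 = a := by
  induction j with
  | zero =>
    cases m with
    | zero => omega
    | succ m' => simp [List.replicate_succ]
  | succ j' ih => simpa [List.replicate_succ] using ih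

lemma set_rep (j m : Nat) (a b c : Int) :
    (List.replicate j b ++ List.replicate (m + 1) a).set j c
      = List.replicate j b ++ c :: List.replicate m a := by
  induction j with
  | zero => simp [List.replicate_succ]
  | succ j' ih => simpa [List.replicate_succ] using ih

lemma solWhile_spec (n quo : Int) (r j m : Nat) (hr : r ≤ m) (hn : (n : Int) = (j : Int) + m) :
    solWhile n (List.replicate j (quo + 1) ++ List.replicate m quo) (r : Int) (j : Int)
      = List.replicate (j + r) (quo + 1) ++ List.replicate (m - r) quo := by
  induction r generalizing j m with
  | zero => rw [solWhile]; simp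
  | succ r' ih =>
    obtain ⟨m', rfl⟩ : ∃ m', m = m' + 1 := ⟨m - 1, by omega⟩
    rw [solWhile]
    have hlt : ¬ ((j : Int) ≥ n) := by omega
    have hpos : (0 : Int) < ((r' + 1 : Nat) : Int) := by positivity
    simp only [hpos, dite_true, hlt, if_false]
    have h1 : ((j : Int)).toNat = j := by omega
    rw [h1, getD_rep j (m' + 1) (by omega) quo (quo + 1), set_rep]
    have h2 : ((r' + 1 : Nat) : Int) - 1 = (r' : Int) := by push_cast; ring
    have h3 : (j : Int) + 1 = ((j + 1 : Nat) : Int) := by push_cast; ring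
    have h4 : List.replicate j (quo + 1) ++ (quo + 1) :: List.replicate m' quo
        = List.replicate (j + 1) (quo + 1) ++ List.replicate m' quo := by
      rw [List.replicate_succ' (n := j)]; simp
    rw [h2, h3, h4, ih (j + 1) m' (by omega) (by push_cast; omega)]
    congr 1 <;> congr 1 <;> omega

lemma rep_pairwise_le (p q : Nat) (a : Int) :
    (List.replicate p a ++ List.replicate q (a + 1)).Pairwise (· ≤ ·) := by
  rw [List.pairwise_append]
  refine ⟨List.pairwise_replicate.2 (by omega), List.pairwise_replicate.2 (by omega), ?_⟩
  intro x hx y hy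
  rw [List.eq_of_mem_replicate hx, List.eq_of_mem_replicate hy]
  omega

-- ===== VERDICT (by name: the statement is the Claim_ definition above) =====
theorem solution_spec : Claim_equal_solution := by
  intro n s _ hn
  unfold Spec_solution solution solution_alt
  by_cases hq : PySem.Int.floordiv s n = 0
  · simp [hq]
  · simp only [hq, if_false]
    rcases lt_or_gt_of_ne hn with hneg | hpos
    · -- n < 0: loop never runs ([quo]*n = [] and rem ≤ 0), both sides are []
      have hb := PySem.Int.mod_neg_bounds s hneg
      have hrem : ¬ (0 : Int) < PySem.Int.mod s n := by omega
      rw [solWhile]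
      simp only [hrem, dite_false]
      have h1 : (n).toNat = 0 := by omega
      have h2 : (n - PySem.Int.mod s n).toNat = 0 := by omega
      have h3 : (PySem.Int.mod s n).toNat = 0 := by omega
      simp [PySem.List.pyRepeat_singleton, h1, h2, h3, PySem.List.sorted]
    · -- n > 0: the loop increments indices 0..rem-1 once each, then sort reorders
      have h0 : (0 : Int) ≤ PySem.Int.mod s n := PySem.Int.mod_nonneg s hpos
      have h1 : PySem.Int.mod s n < n := PySem.Int.mod_lt s hpos
      set quo := PySem.Int.floordiv s n with hquo
      set rem := PySem.Int.mod s n with hrem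
      have hr : rem = ((rem.toNat : Nat) : Int) := by omega
      have hn' : (n : Int) = ((0 : Nat) : Int) + (n.toNat : Nat) := by push_cast; omega
      have := solWhile_spec n quo rem.toNat 0 n.toNat (by omega) hn'
      simp only [List.replicate_zero, List.nil_append, Nat.cast_zero, Nat.zero_add] at this
      rw [PySem.List.pyRepeat_singleton, hr, this]
      rw [PySem.List.sorted_id_eq_of_perm_of_pairwise _
            (List.replicate (n.toNat - rem.toNat) quo
              ++ List.replicate rem.toNat (quo + 1))
            List.perm_append_comm (rep_pairwise_le _ _ _)]
      congr 2
      omega
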